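-- pv_equiv track=rewrite | github.com/Devaaron7/Batch-File-Renamer | Gui Start.py | formatted_alphabet_ext
-- ===== SOURCE A (Python) =====
-- def formatted_alphabet_ext(number, a_list):
--     rotations = []
--     current_sum = 0
--     current_sum += number
--
--     while current_sum != 0:
--         if current_sum > 26:
--             rotations.append(26)
--             current_sum -= 26
--
--         if current_sum <= 26:
--             rotations.append(current_sum)
--             current_sum = 0
--
--
--     left = -1
--     right = 0
--
--     answer = []
--
--     for x in rotations:
--         if right > 0:
--             for z in range(x):
--                 answer.append(a_list[left] + a_list[z])
--         if right <= 0: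
--             for y in range(x):
--                 answer.append(a_list[y])
--         right += 1
--         left += 1
--
--     return answer
-- ===== SOURCE B (Python) =====
-- def formatted_alphabet_ext(number, a_list):
--     answer = []
--     for i in range(number):
--         q, r = divmod(i, 26)
--         answer.append(a_list[r] if q == 0 else a_list[q - 1] + a_list[r])
--     return answer
-- ===== Notes on version B (the rewrite author's own statement) =====
-- stated objective: simpler
-- what changed: Replaces A's two-phase algorithm (a while-loop pre-building a list of 26-sized block counts, then a fold over blocks with left/right bookkeeping and nested inner loops) with a single pass over range(number) that computes each name directly from divmod(i, 26).
import Mathlib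
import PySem

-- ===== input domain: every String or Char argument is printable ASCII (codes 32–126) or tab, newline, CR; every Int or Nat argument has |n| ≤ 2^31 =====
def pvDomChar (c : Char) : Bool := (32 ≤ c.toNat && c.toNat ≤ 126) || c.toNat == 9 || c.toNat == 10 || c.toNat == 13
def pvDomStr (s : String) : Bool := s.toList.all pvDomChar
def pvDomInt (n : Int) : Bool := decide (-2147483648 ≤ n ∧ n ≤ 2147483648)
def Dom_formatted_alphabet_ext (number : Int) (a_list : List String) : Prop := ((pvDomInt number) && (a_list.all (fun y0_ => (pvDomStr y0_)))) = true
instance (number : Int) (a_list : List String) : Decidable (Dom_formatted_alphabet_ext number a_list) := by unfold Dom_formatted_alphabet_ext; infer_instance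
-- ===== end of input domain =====

-- B replaces A's two-phase block construction (while-loop of 26-sized chunks, then per-block
-- left/right bookkeeping) with one pass computing each name from divmod(i, 26); objective: simpler.


-- ===== PORT A =====
-- the while-loop building `rotations`: one call = one loop iteration (both ifs of the body)
def pvRotLoopA (s : Int) : List Int :=
  if s = 0 then []
  else if 26 < s then
    if s - 26 ≤ 26 then [26, s - 26] else 26 :: pvRotLoopA (s - 26)
  else [s]
termination_by s.toNat
decreasing_by omega

-- one iteration of A's `for x in rotations` loop, state = (left, right, answer);
-- a_list[…] is pyGetD, exact under Pre_ (out-of-range indices raise IndexError in Python)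
def pvStepA (a_list : List String) (st : Int × Int × List String) (x : Int) : Int × Int × List String :=
  let left := st.1
  let right := st.2.1
  let answer := st.2.2
  let answer :=
    if 0 < right then
      (PySem.List.pyRange 0 x 1).foldl
        (fun acc z => acc ++ [PySem.List.pyGetD a_list left "" ++ PySem.List.pyGetD a_list z ""]) answer
    else answer
  let answer :=
    if right ≤ 0 then
      (PySem.List.pyRange 0 x 1).foldl
        (fun acc y => acc ++ [PySem.List.pyGetD a_list y ""]) answer
    else answer
  (left + 1, right + 1, answer)

def formatted_alphabet_ext (number : Int) (a_list : List String) : List String :=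
  let rotations := pvRotLoopA (0 + number)
  ((rotations.foldl (pvStepA a_list) (-1, 0, [])).2.2)

-- ===== PORT B =====
def formatted_alphabet_ext_alt (number : Int) (a_list : List String) : List String :=
  (PySem.List.pyRange 0 number 1).foldl
    (fun answer i =>
      let q := PySem.Int.floordiv i 26
      let r := PySem.Int.mod i 26
      answer ++ [if q = 0 then PySem.List.pyGetD a_list r ""
                 else PySem.List.pyGetD a_list (q - 1) "" ++ PySem.List.pyGetD a_list r ""]) []

-- ===== PRECONDITION & SPEC =====
-- Pre_ excludes exactly the inputs where Python A raises IndexError (some accessed index ≥ len(a_list))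
def Pre_formatted_alphabet_ext (number : Int) (a_list : List String) : Prop :=
  number ≤ 0 ∨ (min number 26 ≤ (a_list.length : Int) ∧ number ≤ 26 * ((a_list.length : Int) + 1))
instance (number : Int) (a_list : List String) : Decidable (Pre_formatted_alphabet_ext number a_list) := by unfold Pre_formatted_alphabet_ext; infer_instance

def pvWitness_formatted_alphabet_ext : Int × List String :=
  (3, ["a", "b", "c"])

def Spec_formatted_alphabet_ext (number : Int) (a_list : List String) (out : List String) : Prop := out = formatted_alphabet_ext_alt number a_list
instance (number : Int) (a_list : List String) (out : List String) : Decidable (Spec_formatted_alphabet_ext number a_list out) := by unfold Spec_formatted_alphabet_ext; infer_instance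

-- ===== CLAIM (what is proved, stated in full; the proofs are below) =====
def Claim_equal_formatted_alphabet_ext : Prop := ∀ (number : Int) (a_list : List String), Dom_formatted_alphabet_ext number a_list → Pre_formatted_alphabet_ext number a_list → Spec_formatted_alphabet_ext number a_list (formatted_alphabet_ext number a_list)

-- ===== LEMMAS AND PROOFS =====

-- the column name B computes for global index i
def pvCol (a_list : List String) (i : Int) : String :=
  if PySem.Int.floordiv i 26 = 0 then PySem.List.pyGetD a_list (PySem.Int.mod i 26) ""
  else PySem.List.pyGetD a_list (PySem.Int.floordiv i 26 - 1) "" ++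
       PySem.List.pyGetD a_list (PySem.Int.mod i 26) ""

-- what block j of A appends for block-local index z
def pvBlk (a_list : List String) (j : Nat) (z : Int) : String :=
  if j = 0 then PySem.List.pyGetD a_list z ""
  else PySem.List.pyGetD a_list ((j : Int) - 1) "" ++ PySem.List.pyGetD a_list z ""

lemma pv_flatten_singleton {α β : Type} (g : α → β) (l : List α) :
    (List.map (fun x => [g x]) l).flatten = l.map g := by
  induction l with
  | nil => rfl
  | cons a l ih => simp [ih]

lemma pvCol_eq_blk (a_list : List String) (j : Nat) (z : Int) (h0 : 0 ≤ z) (h1 : z < 26) :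
    pvCol a_list (26 * (j : Int) + z) = pvBlk a_list j z := by
  have hq : PySem.Int.floordiv (26 * (j : Int) + z) 26 = (j : Int) := by
    rw [PySem.Int.floordiv_eq_iff_of_pos (by omega : (0:Int) < 26)]
    constructor <;> nlinarith
  have hr : PySem.Int.mod (26 * (j : Int) + z) 26 = z := by
    have := PySem.Int.floordiv_mul_add_mod (26 * (j : Int) + z) 26
    rw [hq] at this; omega
  unfold pvCol pvBlk
  rw [hq, hr]
  rcases Nat.eq_zero_or_pos j with hj | hj
  · simp [hj]
  · simp [show j ≠ 0 from by omega]

lemma pvStepA_answer (a_list : List String) (j : Nat) (ans : List String) (x : Int) :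
    (pvStepA a_list ((j : Int) - 1, (j : Int), ans) x).2.2
      = ans ++ (PySem.List.pyRange 0 x 1).map (pvBlk a_list j) := by
  unfold pvStepA
  rcases Nat.eq_zero_or_pos j with hj | hj
  · subst hj
    norm_num
    rw [pv_flatten_singleton]
    simp [pvBlk]
  · have h1 : (0 : Int) < (j : Int) := by exact_mod_cast hj
    have h2 : ¬ ((j : Int) ≤ 0) := by omega
    simp only [h1, h2, if_pos, if_false]
    rw [PySem.List.foldl_append_singleton_eq_map]
    simp [pvBlk, show j ≠ 0 from by omega]

lemma pvStepA_full (a_list : List String) (j : Nat) (ans : List String) (x : Int) :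
    pvStepA a_list ((j : Int) - 1, (j : Int), ans) x
      = (((j + 1 : Nat) : Int) - 1, ((j + 1 : Nat) : Int),
         ans ++ (PySem.List.pyRange 0 x 1).map (pvBlk a_list j)) := by
  have h := pvStepA_answer a_list j ans x
  refine Prod.ext ?_ (Prod.ext ?_ ?_)
  · simp [pvStepA]
  · simp [pvStepA]
  · simpa using h

-- the main invariant: A's block fold over pvRotLoopA s, entered at block index j
lemma pvLoopA_main (a_list : List String) :
    ∀ n : Nat, ∀ s : Int, s = (n : Int) → 0 < s → ∀ j : Nat, ∀ ans : List String,
      ((pvRotLoopA s).foldl (pvStepA a_list) ((j : Int) - 1, (j : Int), ans)).2.2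
        = ans ++ (List.range n).map (fun (z : Nat) => pvCol a_list (26 * (j : Int) + (z : Int))) := by
  intro n
  induction n using Nat.strong_induction_on with
  | _ n ih =>
    intro s hs hpos j ans
    have hne : s ≠ 0 := by omega
    by_cases h26 : 26 < s
    · have hn : n = 26 + (n - 26) := by omega
      by_cases hrem : s - 26 ≤ 26
      · -- rotations = [26, s - 26] : a full block j, then the final block j + 1
        rw [pvRotLoopA]
        simp only [hne, h26, hrem, ite_false, if_pos]
        simp only [List.foldl_cons, List.foldl_nil]
        rw [pvStepA_full, pvStepA_answer]
        rw [hn, List.range_add, List.map_append, List.append_assoc]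
        congr 1
        rw [List.map_map]
        congr 1
        · -- block j
          rw [PySem.List.pyRange_one, List.map_map]
          have e1 : ((26 : Int) - 0).toNat = 26 := by decide
          rw [e1]
          apply List.map_congr_left
          intro z hz
          have hz' : z < 26 := List.mem_range.mp hz
          simp only [Function.comp_apply, zero_add]
          exact (pvCol_eq_blk a_list j z (by omega) (by omega)).symm
        · -- block j + 1
          rw [PySem.List.pyRange_one, List.map_map]
          have e2 : (s - 26 - 0).toNat = n - 26 := by omega
          rw [e2]
          apply List.map_congr_left
          intro z hz
          have hz1 : z < n - 26 := List.mem_range.mp hz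
          simp only [Function.comp_apply, zero_add]
          rw [← pvCol_eq_blk a_list (j + 1) (z : Int) (by omega) (by omega)]
          congr 1
          push_cast
          ring
      · -- rotations = 26 :: pvRotLoopA (s - 26) : a full block j, then the rest
        rw [pvRotLoopA]
        simp only [hne, h26, hrem, ite_false, if_pos]
        simp only [List.foldl_cons]
        rw [pvStepA_full]
        rw [ih (n - 26) (by omega) (s - 26) (by omega) (by omega) (j + 1)]
        rw [hn, List.range_add, List.map_append, List.append_assoc]
        congr 1
        rw [List.map_map]
        congr 1
        · rw [PySem.List.pyRange_one, List.map_map]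
          have e1 : ((26 : Int) - 0).toNat = 26 := by decide
          rw [e1]
          apply List.map_congr_left
          intro z hz
          have hz' : z < 26 := List.mem_range.mp hz
          simp only [Function.comp_apply, zero_add]
          exact (pvCol_eq_blk a_list j z (by omega) (by omega)).symm
        · have e4 : 26 + (n - 26) - 26 = n - 26 := by omega
          rw [e4]
          apply List.map_congr_left
          intro z hz
          simp only [Function.comp_apply]
          congr 1
          push_cast
          ring
    · -- rotations = [s] : the single (first and last) block j
      rw [pvRotLoopA]
      simp only [hne, h26, ite_false]
      simp only [List.foldl_cons, List.foldl_nil]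
      rw [pvStepA_answer]
      congr 1
      rw [PySem.List.pyRange_one, List.map_map]
      have e3 : (s - 0).toNat = n := by omega
      rw [e3]
      apply List.map_congr_left
      intro z hz
      have hz1 : z < n := List.mem_range.mp hz
      simp only [Function.comp_apply, zero_add]
      exact (pvCol_eq_blk a_list j z (by omega) (by omega)).symm

lemma pvAlt_eq_map (number : Int) (a_list : List String) :
    formatted_alphabet_ext_alt number a_list
      = (PySem.List.pyRange 0 number 1).map (pvCol a_list) := by
  unfold formatted_alphabet_ext_alt
  rw [PySem.List.foldl_append_singleton_eq_map]
  simp [pvCol]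

-- ===== VERDICT (by name: the statement is the Claim_ definition above) =====
theorem formatted_alphabet_ext_spec : Claim_equal_formatted_alphabet_ext := by
  intro number a_list _ _
  unfold Spec_formatted_alphabet_ext
  rw [pvAlt_eq_map]
  unfold formatted_alphabet_ext
  rw [zero_add]
  show ((pvRotLoopA number).foldl (pvStepA a_list) (-1, 0, [])).2.2
      = (PySem.List.pyRange 0 number 1).map (pvCol a_list)
  by_cases hpos : 0 < number
  · have key := pvLoopA_main a_list number.toNat number (by omega) hpos 0 []
    norm_num at key
    rw [key]
    rw [PySem.List.pyRange_one, List.map_map]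
    have e : (number - 0).toNat = number.toNat := by omega
    rw [e]
    try simp only [List.nil_append]
    apply List.map_congr_left
    intro z _
    simp
  · have hz : number.toNat = 0 := by omega
    rw [PySem.List.pyRange_one]
    have e : (number - 0).toNat = 0 := by omega
    rw [e]
    simp only [List.range_zero, List.map_nil]
    by_cases h0 : number = 0
    · subst h0; rw [pvRotLoopA]; simp
    · rw [pvRotLoopA]
      have h26 : ¬ (26 < number) := by omega
      simp only [h0, h26, ite_false]
      simp only [List.foldl_cons, List.foldl_nil]
      unfold pvStepA
      simp [PySem.List.pyRange_one_eq_nil (by omega : number ≤ 0)]
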